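/- GENERATED by farm/mkstatement.py from design/units.tsv (unit `start_decoder.R7a`) and the assertions of Vorbis/Spec/StartDecoderR7.lean — do not edit.
   THE STATEMENT of the proof unit `start_decoder.R7a`: segment R7a of `start_decoder` (29 instructions; entries 0x115db9;
   exits 0x115982,0x115e3c; ranges 0x115db9-0x115e37)
   takes each of its entry assertions to one of its exit assertions (`Vorbis.Spec.StartDecoder.SegR7a`), given the contracts of its callees.
   What the names mean: Vorbis/Spec/Basic.lean (the shared hypotheses), Vorbis/Spec/StartDecoderR7.lean (the assertions). The theorem to prove:
   `theorem start_decoder_R7a_ok : Vorbis.Spec.start_decoder_R7a.Statement`. -/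
import Vorbis.Spec.Alloc
import Vorbis.Spec.StartDecoderR7
namespace Vorbis.Spec.start_decoder_R7a
open X86 X86.User Asan

/-- The statement of unit `start_decoder.R7a`. -/
def Statement : Prop :=
  ∀ (Lay : Layout) (_hLay : Lay.hi = 0x1000000) (μ : Microarch) (_hμ : UserX.MicroOK μ) (u₀ : State)
    (_hcode : HasCodeNat Lay u₀ Vorbis.L.start_decoder.entry Vorbis.Code.code_start_decoder.nat Vorbis.L.start_decoder.size)
    (_h_asan_load8_noabort : Asan.SmallCheck Lay μ Vorbis.WayInv (Vorbis.CodeOK u₀) [.rax, .rcx, .rdx] 8 Vorbis.L.__asan_load8_noabort.entry)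
    (_h_asan_load1_noabort : Asan.SmallCheck Lay μ Vorbis.WayInv (Vorbis.CodeOK u₀) [.rax, .rdx] 1 Vorbis.L.__asan_load1_noabort.entry)
    (_h_asan_load4_noabort : Asan.SmallCheck Lay μ Vorbis.WayInv (Vorbis.CodeOK u₀) [.rax, .rcx, .rdx] 4 Vorbis.L.__asan_load4_noabort.entry)
    (_h_setup_malloc : ∀ (others : List Obj) (frames : List (Nat × FrameLayout)) (A : Arena), Calls Lay μ Vorbis.WayInv (Vorbis.conv u₀) Vorbis.L.setup_malloc.entry (Vorbis.Spec.setup_malloc.spec others frames A)),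
    Vorbis.Spec.StartDecoder.SegR7a Lay μ u₀

end Vorbis.Spec.start_decoder_R7a
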